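-- pv_equiv track=rewrite | github.com/Sawyer9890/DreamSchool_Interview | p01.py | process3
-- ===== SOURCE A (Python) =====
-- def process3(source, target, dp):
--     dic = {}
--     for char in source:
--         dic[char] = 1
--     if dic.get(target[0]) is None:
--         return -1
--
--     index = source.index(target[0]) + 1
--     dp.append(1)
--
--     for i in range(1, len(target)):
--         while index < len(source):
--             if target[i] == source[index]:
--                 dp.append(dp[-1])
--                 index += 1
--                 break
--             else:
--                 index += 1
--         else:
--             if dic.get(target[i]) is not None:
--                 dp.append(dp[-1] + 1)
--             else:
--                 return -1
--             index = source.index(target[i]) + 1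
--     return dp[-1]
-- ===== SOURCE B (Python) =====
-- from bisect import bisect_left
--
-- def process3(source, target, dp):
--     pos = {}
--     for i, ch in enumerate(source):
--         pos.setdefault(ch, []).append(i)
--     passes = 0
--     index = len(source)  # forces a fresh pass for the first character
--     for ch in target:
--         lst = pos.get(ch)
--         if lst is None:
--             return -1
--         k = bisect_left(lst, index)
--         if k == len(lst):
--             passes += 1
--             index = lst[0] + 1
--         else:
--             index = lst[k] + 1
--         dp.append(passes)
--     return passes
-- ===== Notes on version B (the rewrite author's own statement) =====
-- stated objective: alternative
-- what changed: B builds one dict of per-character position lists and advances through target with a binary search for the next occurrence, instead of A's repeated linear forward scans of source (and its extra source.index passes on every wrap-around); the trailing dp list is replaced by a single passes counter.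
-- crash fix: On an empty target A raises IndexError reading target[0]; B returns 0 (no pass is needed to spell an empty target). — e.g. on process3("ab", "", []): A raises IndexError, B returns 0
import Mathlib
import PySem

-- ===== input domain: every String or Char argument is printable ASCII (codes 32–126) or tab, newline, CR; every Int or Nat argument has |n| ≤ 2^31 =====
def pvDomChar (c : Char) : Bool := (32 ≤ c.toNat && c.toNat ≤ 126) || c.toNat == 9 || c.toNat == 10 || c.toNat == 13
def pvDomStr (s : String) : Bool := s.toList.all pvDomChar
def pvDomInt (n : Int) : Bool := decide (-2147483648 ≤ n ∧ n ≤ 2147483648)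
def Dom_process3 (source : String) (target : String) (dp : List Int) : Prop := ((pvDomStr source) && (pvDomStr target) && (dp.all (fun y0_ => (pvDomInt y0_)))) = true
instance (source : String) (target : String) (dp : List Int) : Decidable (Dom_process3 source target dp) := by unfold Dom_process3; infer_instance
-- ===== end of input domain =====

-- B replaces A's repeated forward scans of `source` with per-character index lists
-- queried by binary search (a different algorithm). Both Pythons mutate `dp` in place
-- (the same appends); the equivalence proved here is about the RETURN value only.

-- ===== PORT A =====
-- the inner `while index < len(source): … break / else:` loop: scan forward for target char,
-- returning the index it broke at (none = loop fell through)
def scanA (src : List Char) (c : Char) (index : Nat) : Option Nat :=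
  if h : index < src.length then
    if c = src[index] then some index else scanA src c (index + 1)
  else none
termination_by src.length - index

-- body of `for i in range(1, len(target))`; state: returned value, or (dp, index)
def stepA (src : List Char) (dic : PySem.Dict Char Int)
    (st : Sum Int (List Int × Nat)) (c : Char) : Sum Int (List Int × Nat) :=
  match st with
  | .inl r => .inl r
  | .inr (dp, index) =>
    match scanA src c index with
    | some j => .inr (dp ++ [(PySem.List.pyGet? dp (-1)).getD 0], j + 1)
    | none =>
      if (dic.get? c).isSome then
        .inr (dp ++ [(PySem.List.pyGet? dp (-1)).getD 0 + 1],
              (PySem.List.index? src c).getD 0 + 1)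
      else .inl (-1)

def process3 (source : String) (target : String) (dp : List Int) : Int :=
  let src := source.toList
  let tgt := target.toList
  let dic := src.foldl (fun d ch => d.insert ch (1 : Int)) PySem.Dict.empty
  match PySem.List.pyGet? tgt 0 with
  | none => 0   -- Python raises IndexError here (target = ""); outside Pre_process3
  | some c0 =>
    if (dic.get? c0).isNone then -1
    else
      let index := (PySem.List.index? src c0).getD 0 + 1
      let dp := dp ++ [(1 : Int)]
      match (PySem.List.pyRange 1 (tgt.length : Int) 1).foldl
          (fun st i => stepA src dic st (PySem.List.pyGetD tgt i ' ')) (.inr (dp, index)) with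
      | .inl r => r
      | .inr (dp, _) => (PySem.List.pyGet? dp (-1)).getD 0

-- ===== PORT B =====
-- body of `for ch in target`; state: returned value, or (passes, index)
def stepB (pos : PySem.Dict Char (List Int))
    (st : Sum Int (Int × Int)) (c : Char) : Sum Int (Int × Int) :=
  match st with
  | .inl r => .inl r
  | .inr (passes, index) =>
    match pos.get? c with
    | none => .inl (-1)
    | some lst =>
      let k := PySem.List.bisectLeft lst index
      if k = lst.length then .inr (passes + 1, lst.getD 0 0 + 1)
      else .inr (passes, lst.getD k 0 + 1)

def process3_alt (source : String) (target : String) (dp : List Int) : Int :=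
  let src := source.toList
  let pos := (PySem.List.enumerate src).foldl
      (fun d p => d.modify p.2 [] (fun l => l ++ [p.1]))
      (PySem.Dict.empty : PySem.Dict Char (List Int))
  match target.toList.foldl (stepB pos) (.inr (0, (src.length : Int))) with
  | .inl r => r
  | .inr (passes, _) => passes

-- ===== PRECONDITION & SPEC =====
-- Pre_ excludes only the empty target, on which A raises IndexError (target[0]).
def Pre_process3 (source : String) (target : String) (dp : List Int) : Prop := target ≠ ""
instance (source : String) (target : String) (dp : List Int) : Decidable (Pre_process3 source target dp) := by unfold Pre_process3; infer_instance
def pvWitness_process3 : String × String × List Int := ("abcab", "bcb", [0])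

-- On an empty target A raises IndexError (it reads target[0]); B returns 0 (no pass needed).
def Raises_process3 (source : String) (target : String) (dp : List Int) : Prop := target = ""
instance (source : String) (target : String) (dp : List Int) : Decidable (Raises_process3 source target dp) := by unfold Raises_process3; infer_instance
def pvRaiseWitness_process3 : String × String × List Int := ("ab", "", [])
def pvRaiseWitnessOut_process3 : Int := 0

def Spec_process3 (source : String) (target : String) (dp : List Int) (out : Int) : Prop := out = process3_alt source target dp
instance (source : String) (target : String) (dp : List Int) (out : Int) : Decidable (Spec_process3 source target dp out) := by unfold Spec_process3; infer_instance

-- ===== CLAIM (what is proved, stated in full; the proofs are below) =====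
def Claim_equal_process3 : Prop := ∀ (source : String) (target : String) (dp : List Int), Dom_process3 source target dp → Pre_process3 source target dp → Spec_process3 source target dp (process3 source target dp)
def Claim_raises_process3 : Prop := (∀ (source : String) (target : String) (dp : List Int), Dom_process3 source target dp → Raises_process3 source target dp → ¬ Pre_process3 source target dp) ∧ (Dom_process3 (pvRaiseWitness_process3.1) (pvRaiseWitness_process3.2.1) (pvRaiseWitness_process3.2.2) ∧ Raises_process3 (pvRaiseWitness_process3.1) (pvRaiseWitness_process3.2.1) (pvRaiseWitness_process3.2.2) ∧ process3_alt (pvRaiseWitness_process3.1) (pvRaiseWitness_process3.2.1) (pvRaiseWitness_process3.2.2) = pvRaiseWitnessOut_process3)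

-- ===== LEMMAS AND PROOFS =====

-- the list of positions (as Python ints) at which `c` occurs in `src`
def occ (src : List Char) (c : Char) : List Int :=
  ((PySem.List.enumerate src).filter (fun p => p.2 == c)).map (fun p => p.1)

lemma mem_occ {src : List Char} {c : Char} {j : Int} :
    j ∈ occ src c ↔ ∃ (m : Nat) (hm : m < src.length), j = (m : Int) ∧ src[m] = c := by
  simp only [occ, List.mem_map, List.mem_filter, PySem.List.mem_enumerate_iff]
  constructor
  · rintro ⟨p, ⟨⟨m, hm, rfl⟩, hc⟩, rfl⟩
    exact ⟨m, hm, by simpa using hc.symm ▸ rfl, by simpa using hc⟩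
  · rintro ⟨m, hm, rfl, hc⟩
    exact ⟨((m : Int), src[m]), ⟨⟨m, hm, by simp⟩, by simpa using hc⟩, rfl⟩

lemma occ_pairwise_lt (src : List Char) (c : Char) : (occ src c).Pairwise (· < ·) := by
  exact ((PySem.List.pairwise_lt_enumerate src 0).filter _).map _ (fun _ _ h => h)

lemma occ_ne_nil {src : List Char} {c : Char} (h : c ∈ src) : occ src c ≠ [] := by
  obtain ⟨m, hm, rfl⟩ := List.mem_iff_getElem.mp h
  exact List.ne_nil_of_mem (mem_occ.mpr ⟨m, hm, rfl, rfl⟩)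

lemma occ_head {src : List Char} {c : Char} {k : Nat} (h : PySem.List.index? src c = some k) :
    (occ src c).getD 0 0 = (k : Int) := by
  obtain ⟨hk, hck, hmin⟩ := PySem.List.getElem_of_index?_eq_some h
  have hcm : c ∈ src := hck ▸ List.getElem_mem hk
  have hlen : 0 < (occ src c).length := List.length_pos_iff.mpr (occ_ne_nil hcm)
  have h0 : (occ src c).getD 0 0 = (occ src c)[0] := List.getD_eq_getElem _ _ hlen
  obtain ⟨m, hm, hem, hsm⟩ := mem_occ.mp (List.getElem_mem hlen)
  obtain ⟨i, hi, hie⟩ := List.mem_iff_getElem.mp (mem_occ.mpr ⟨k, hk, rfl, hck⟩)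
  have hle : (occ src c)[0] ≤ (k : Int) := by
    rcases Nat.eq_zero_or_pos i with h0i | h0i
    · subst h0i; exact le_of_eq hie
    · exact le_of_lt (hie ▸ (List.pairwise_iff_getElem.mp (occ_pairwise_lt src c) 0 i hlen hi h0i))
  have hge : (k : Int) ≤ (m : Int) := by
    by_contra hlt
    push_neg at hlt
    exact hmin m (by exact_mod_cast hlt) hsm
  rw [h0, hem] at *
  omega

lemma scanA_none_iff (src : List Char) (c : Char) (i : Nat) :
    scanA src c i = none ↔ ∀ m, i ≤ m → ∀ (hm : m < src.length), src[m] ≠ c := by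
  fun_induction scanA src c i with
  | case1 i h hc =>
    constructor
    · intro he; exact absurd he (by simp)
    · intro hall; exact absurd (hc.symm) (hall i le_rfl h)
  | case2 i h hc ih =>
    rw [ih]
    constructor
    · intro hall m him hm
      rcases eq_or_lt_of_le him with rfl | hlt
      · exact fun he => hc he.symm
      · exact hall m hlt hm
    · intro hall m him hm; exact hall m (le_of_lt him) hm
  | case3 i h =>
    constructor
    · intro _ m him hm; omega
    · intro _; rfl

lemma scanA_eq_some (src : List Char) (c : Char) (i j : Nat) (hij : i ≤ j)
    (hj : j < src.length) (hc : src[j] = c)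
    (hmin : ∀ m, i ≤ m → m < j → ∀ (hm : m < src.length), src[m] ≠ c) :
    scanA src c i = some j := by
  have key : ∀ n i, i ≤ j → j - i = n →
      (∀ m, i ≤ m → m < j → ∀ (hm : m < src.length), src[m] ≠ c) → scanA src c i = some j := by
    intro n
    induction n with
    | zero =>
      intro i hij' hd _
      have : i = j := by omega
      subst this
      rw [scanA]
      simp [hj, hc]
    | succ n ih =>
      intro i hij' hd hmin'
      have hij'' : i < j := by omega
      have hi : i < src.length := lt_trans hij'' hj
      rw [scanA]
      rw [dif_pos hi, if_neg (fun he => hmin' i le_rfl hij'' hi he.symm)]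
      exact ih (i + 1) (by omega) (by omega) (fun m hm1 hm2 hm3 => hmin' m (by omega) hm2 hm3)
  exact key (j - i) i hij rfl hmin

-- the crux: the binary search over the occurrence list computes what A's forward scan finds
lemma bisect_scan (src : List Char) (c : Char) (hc : c ∈ src) (idx : Nat) :
    (PySem.List.bisectLeft (occ src c) (idx : Int) = (occ src c).length ∧
       scanA src c idx = none) ∨
    (PySem.List.bisectLeft (occ src c) (idx : Int) ≠ (occ src c).length ∧
       ∃ j, scanA src c idx = some j ∧
         (j : Int) = (occ src c).getD (PySem.List.bisectLeft (occ src c) (idx : Int)) 0) := by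
  obtain ⟨h1, h2, h3⟩ := PySem.List.bisectLeft_spec (occ src c) (idx : Int)
    ((occ_pairwise_lt src c).imp le_of_lt)
  set lst := occ src c with hlst
  set k := PySem.List.bisectLeft lst (idx : Int) with hk
  by_cases hkl : k = lst.length
  · left
    refine ⟨hkl, (scanA_none_iff src c idx).mpr ?_⟩
    intro m him hm he
    obtain ⟨j', hj', hje⟩ := List.mem_iff_getElem.mp (mem_occ.mpr ⟨m, hm, rfl, he⟩)
    have := h2 j' hj' (hkl ▸ hj')
    rw [hje] at this
    omega
  · right
    have hklt : k < lst.length := lt_of_le_of_ne h1 hkl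
    obtain ⟨m, hm, hme, hmc⟩ := mem_occ.mp (List.getElem_mem hklt)
    have hge : (idx : Int) ≤ (m : Int) := hme ▸ h3 k hklt le_rfl
    refine ⟨hkl, m, ?_, by rw [List.getD_eq_getElem _ _ hklt, ← hme]⟩
    refine scanA_eq_some src c idx m (by exact_mod_cast hge) hm hmc ?_
    intro m' him' hmm' hm' he'
    obtain ⟨j', hj', hje⟩ := List.mem_iff_getElem.mp (mem_occ.mpr ⟨m', hm', rfl, he'⟩)
    have hjk : j' < k := by
      by_contra hge'
      push_neg at hge'
      rcases eq_or_lt_of_le hge' with rfl | hlt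
      · rw [hje] at hme; omega
      · have := List.pairwise_iff_getElem.mp (occ_pairwise_lt src c) k j' hklt hj' hlt
        rw [hje, hme] at this
        omega
    have := h2 j' hj' hjk
    rw [hje] at this
    omega

lemma bisect_full (src : List Char) (c : Char) :
    PySem.List.bisectLeft (occ src c) (src.length : Int) = (occ src c).length := by
  obtain ⟨h1, h2, h3⟩ := PySem.List.bisectLeft_spec (occ src c) (src.length : Int)
    ((occ_pairwise_lt src c).imp le_of_lt)
  by_contra hne
  have hklt : PySem.List.bisectLeft (occ src c) (src.length : Int) < (occ src c).length :=
    lt_of_le_of_ne h1 hne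
  obtain ⟨m, hm, hme, _⟩ := mem_occ.mp (List.getElem_mem hklt)
  have := h3 _ hklt le_rfl
  rw [hme] at this
  omega

-- the dictionaries the two ports build, characterised
lemma dic_isSome (src : List Char) (c : Char) :
    ((src.foldl (fun d ch => d.insert ch (1 : Int)) PySem.Dict.empty).get? c).isSome ↔ c ∈ src := by
  rw [Option.isSome_iff_ne_none, ne_eq, PySem.Dict.get?_eq_none_iff_not_mem_keys,
    PySem.Dict.keys_foldl_insert, PySem.Dict.keys_empty]
  simp [PySem.Set.mem_update]

lemma pos_get? (src : List Char) (c : Char) :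
    ((PySem.List.enumerate src).foldl
        (fun d p => d.modify p.2 [] (fun l => l ++ [p.1]))
        (PySem.Dict.empty : PySem.Dict Char (List Int))).get? c
      = if c ∈ src then some (occ src c) else none := by
  set d := (PySem.List.enumerate src).foldl
      (fun d p => d.modify p.2 [] (fun l => l ++ [p.1]))
      (PySem.Dict.empty : PySem.Dict Char (List Int)) with hd
  have hkeys : c ∈ d.keys ↔ c ∈ src := by
    rw [hd, PySem.Dict.keys_foldl_modify_key, PySem.Dict.keys_empty,
      PySem.List.map_snd_enumerate]
    simp [PySem.Set.mem_update]
  have hgetD : d.getD c [] = occ src c := by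
    rw [hd, show (PySem.List.enumerate src).foldl
          (fun d p => d.modify p.2 [] (fun l => l ++ [p.1]))
          (PySem.Dict.empty : PySem.Dict Char (List Int))
        = ((PySem.List.enumerate src).map (fun p => (p.2, p.1))).foldl
          (fun d q => d.modify q.1 [] (fun l => l ++ [q.2]))
          (PySem.Dict.empty : PySem.Dict Char (List Int)) from
        (@List.foldl_map (Int × Char) (Char × Int) (PySem.Dict Char (List Int))
          (fun p => (p.2, p.1)) (fun d q => d.modify q.1 [] (fun l => l ++ [q.2]))
          (PySem.List.enumerate src) PySem.Dict.empty).symm,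
      PySem.Dict.getD_foldl_modify_append, PySem.Dict.getD_empty]
    simp only [List.filter_map, List.map_map, occ, List.nil_append]
    rfl
  by_cases hc : c ∈ src
  · rw [if_pos hc]
    have hne : d.get? c ≠ none := by
      rw [ne_eq, PySem.Dict.get?_eq_none_iff_not_mem_keys]
      simp [hkeys, hc]
    obtain ⟨lst, hl⟩ := Option.ne_none_iff_exists'.mp hne
    rw [hl, ← hgetD, PySem.Dict.getD_eq_get?_getD, hl]
    rfl
  · rw [if_neg hc, PySem.Dict.get?_eq_none_iff_not_mem_keys]
    simp [hkeys, hc]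

-- one step of the two loops, in lock-step
lemma step_sim (src : List Char) (dic : PySem.Dict Char Int) (pos : PySem.Dict Char (List Int))
    (Hdic : ∀ c, (dic.get? c).isSome ↔ c ∈ src)
    (Hpos : ∀ c, pos.get? c = if c ∈ src then some (occ src c) else none)
    (c : Char) (dpl : List Int) (p : Int) (idx : Nat) (hlast : dpl.getLast? = some p) :
    (stepA src dic (.inr (dpl, idx)) c = .inl (-1) ∧
       stepB pos (.inr (p, (idx : Int))) c = .inl (-1)) ∨
    (∃ dpl' p' idx', stepA src dic (.inr (dpl, idx)) c = .inr (dpl', idx') ∧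
       stepB pos (.inr (p, (idx : Int))) c = .inr (p', (idx' : Int)) ∧
       dpl'.getLast? = some p') := by
  by_cases hc : c ∈ src
  · have hp := Hpos c
    rw [if_pos hc] at hp
    rcases bisect_scan src c hc idx with ⟨hk, hscan⟩ | ⟨hk, j, hscan, hj⟩
    · right
      have hdic : (dic.get? c).isSome := (Hdic c).mpr hc
      obtain ⟨k0, hk0⟩ : ∃ k0, PySem.List.index? src c = some k0 :=
        Option.isSome_iff_exists.mp ((PySem.List.index?_isSome_iff src c).mpr hc)
      refine ⟨dpl ++ [p + 1], p + 1, (PySem.List.index? src c).getD 0 + 1, ?_, ?_, by simp⟩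
      · simp [stepA, hscan, hdic, PySem.List.pyGet?_neg_one, hlast]
      · simp only [stepB, hp]
        rw [if_pos hk, occ_head hk0, hk0]
        simp [Option.getD]
    · right
      refine ⟨dpl ++ [p], p, j + 1, ?_, ?_, by simp⟩
      · simp [stepA, hscan, PySem.List.pyGet?_neg_one, hlast]
      · simp only [stepB, hp]
        rw [if_neg hk, ← hj]
        push_cast
        ring_nf
  · left
    have hdic : ¬ (dic.get? c).isSome := fun h => hc ((Hdic c).mp h)
    have hscan : scanA src c idx = none :=
      (scanA_none_iff _ _ _).mpr (fun m _ hm he => hc (he ▸ List.getElem_mem hm))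
    have hp := Hpos c
    rw [if_neg hc] at hp
    constructor
    · simp [stepA, hscan, Option.isSome_eq_false_iff.mp (by simpa using hdic)]
    · simp [stepB, hp]

lemma foldA_inl (src : List Char) (dic : PySem.Dict Char Int) (cs : List Char) (r : Int) :
    cs.foldl (stepA src dic) (.inl r) = .inl r := by
  induction cs with
  | nil => rfl
  | cons c cs ih => simpa [stepA] using ih

lemma foldB_inl (pos : PySem.Dict Char (List Int)) (cs : List Char) (r : Int) :
    cs.foldl (stepB pos) (.inl r) = .inl r := by
  induction cs with
  | nil => rfl
  | cons c cs ih => simpa [stepB] using ih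

def extractA (st : Sum Int (List Int × Nat)) : Int :=
  match st with
  | .inl r => r
  | .inr (dpl, _) => (PySem.List.pyGet? dpl (-1)).getD 0

def extractB (st : Sum Int (Int × Int)) : Int :=
  match st with
  | .inl r => r
  | .inr (p, _) => p

lemma fold_sim (src : List Char) (dic : PySem.Dict Char Int) (pos : PySem.Dict Char (List Int))
    (Hdic : ∀ c, (dic.get? c).isSome ↔ c ∈ src)
    (Hpos : ∀ c, pos.get? c = if c ∈ src then some (occ src c) else none)
    (cs : List Char) : ∀ (dpl : List Int) (p : Int) (idx : Nat), dpl.getLast? = some p →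
    extractA (cs.foldl (stepA src dic) (.inr (dpl, idx)))
      = extractB (cs.foldl (stepB pos) (.inr (p, (idx : Int)))) := by
  induction cs with
  | nil =>
    intro dpl p idx h
    simp [extractA, extractB, PySem.List.pyGet?_neg_one, h]
  | cons c cs ih =>
    intro dpl p idx h
    rcases step_sim src dic pos Hdic Hpos c dpl p idx h with ⟨hA, hB⟩ | ⟨dpl', p', idx', hA, hB, h'⟩
    · simp [hA, hB, foldA_inl, foldB_inl, extractA, extractB]
    · simp only [List.foldl_cons, hA, hB]
      exact ih dpl' p' idx' h'

-- ===== VERDICT (by name: the statement is the Claim_ definition above) =====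
theorem process3_spec : Claim_equal_process3 := by
  intro source target dp _ hpre
  unfold Spec_process3 process3 process3_alt
  obtain ⟨c0, rest, htgt⟩ : ∃ c0 rest, target.toList = c0 :: rest := by
    cases h : target.toList with
    | nil =>
      exact absurd (String.toList_inj.mp (h.trans (by decide : ([] : List Char) = "".toList))) hpre
    | cons a l => exact ⟨a, l, rfl⟩
  simp only [htgt]
  set src := source.toList with hsrc
  set dic := src.foldl (fun d ch => d.insert ch (1 : Int)) PySem.Dict.empty with hdic
  set pos := (PySem.List.enumerate src).foldl
      (fun d p => d.modify p.2 [] (fun l => l ++ [p.1]))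
      (PySem.Dict.empty : PySem.Dict Char (List Int)) with hpos
  have Hdic : ∀ c, ((dic.get? c).isSome : Prop) ↔ c ∈ src := fun c => dic_isSome src c
  have Hpos : ∀ c, pos.get? c = if c ∈ src then some (occ src c) else none :=
    fun c => pos_get? src c
  rw [PySem.List.pyGet?_zero_cons]
  dsimp only
  by_cases hc : c0 ∈ src
  · have hsome : (dic.get? c0).isSome := (Hdic c0).mpr hc
    have hnn : dic.get? c0 ≠ none := Option.isSome_iff_ne_none.mp hsome
    rw [if_neg (by simp [hnn])]
    obtain ⟨k0, hk0⟩ : ∃ k0, PySem.List.index? src c0 = some k0 :=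
      Option.isSome_iff_exists.mp ((PySem.List.index?_isSome_iff src c0).mpr hc)
    have hA : (PySem.List.pyRange 1 ((c0 :: rest).length : Int) 1).foldl
        (fun st i => stepA src dic st (PySem.List.pyGetD (c0 :: rest) i ' '))
        (.inr (dp ++ [(1 : Int)], (PySem.List.index? src c0).getD 0 + 1))
        = rest.foldl (stepA src dic)
            (.inr (dp ++ [(1 : Int)], (PySem.List.index? src c0).getD 0 + 1)) := by
      rw [PySem.List.foldl_pyRange_pyGetD' (c0 :: rest) ' ' (stepA src dic) _ (by norm_num)]
      rfl
    rw [hA]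
    have hB : stepB pos (.inr (0, (src.length : Int))) c0
        = .inr (1, (((PySem.List.index? src c0).getD 0 + 1 : Nat) : Int)) := by
      simp only [stepB, Hpos c0, if_pos hc]
      rw [if_pos (bisect_full src c0), occ_head hk0, hk0]
      simp [Option.getD]
    rw [List.foldl_cons, hB]
    exact fold_sim src dic pos Hdic Hpos rest (dp ++ [(1 : Int)]) 1
      ((PySem.List.index? src c0).getD 0 + 1) (by simp)
  · have hnone : dic.get? c0 = none := Option.not_isSome_iff_eq_none.mp (by simp [Hdic c0, hc])
    rw [if_pos (by simp [hnone])]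
    have hstep : stepB pos (.inr (0, (src.length : Int))) c0 = .inl (-1) := by
      simp [stepB, Hpos c0, hc]
    rw [List.foldl_cons, hstep, foldB_inl]

@[simp]
theorem process3_raises : Claim_raises_process3 := by
  unfold Claim_raises_process3
  exact ⟨fun s t d _ h hp => hp h, by decide⟩
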